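-- pv_equiv track=rewrite | github.com/megascienta/sciona | src/sciona/code_analysis/core/extract/languages/java_imports.py | module_prefix_for_package
-- ===== SOURCE A (Python) =====
-- from typing import Optional
--
-- def module_prefix_for_package(module_name: str, package_name: Optional[str]) -> str | None:
--     if not package_name:
--         return None
--     module_parts = module_name.split(".")
--     package_parts = package_name.split(".")
--     if len(module_parts) < len(package_parts):
--         return None
--     for idx in range(len(module_parts) - len(package_parts), -1, -1):
--         if module_parts[idx : idx + len(package_parts)] == package_parts:
--             prefix_parts = module_parts[:idx]
--             return ".".join(prefix_parts) if prefix_parts else None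
--     return None
-- ===== SOURCE B (Python) =====
-- from typing import Optional
--
--
-- def module_prefix_for_package(module_name: str, package_name: Optional[str]) -> str | None:
--     # Scan the dotted string itself instead of split token lists: find the
--     # last token-boundary-aligned occurrence of package_name in module_name.
--     if not package_name:
--         return None
--     m = module_name
--     p = package_name
--     for i in range(len(m) - len(p), -1, -1):
--         if (m[i:i + len(p)] == p
--                 and (i == 0 or m[i - 1] == ".")
--                 and (i + len(p) == len(m) or m[i + len(p)] == ".")):
--             return m[:i - 1] if i > 0 else None
--     return None
-- ===== Notes on version B (the rewrite author's own statement) =====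
-- stated objective: alternative
-- what changed: B never splits the strings: instead of building both token lists and comparing token-list slices, it scans the dotted module string itself for the last occurrence of package_name that is aligned on '.' token boundaries and returns the character prefix before it.
import Mathlib
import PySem

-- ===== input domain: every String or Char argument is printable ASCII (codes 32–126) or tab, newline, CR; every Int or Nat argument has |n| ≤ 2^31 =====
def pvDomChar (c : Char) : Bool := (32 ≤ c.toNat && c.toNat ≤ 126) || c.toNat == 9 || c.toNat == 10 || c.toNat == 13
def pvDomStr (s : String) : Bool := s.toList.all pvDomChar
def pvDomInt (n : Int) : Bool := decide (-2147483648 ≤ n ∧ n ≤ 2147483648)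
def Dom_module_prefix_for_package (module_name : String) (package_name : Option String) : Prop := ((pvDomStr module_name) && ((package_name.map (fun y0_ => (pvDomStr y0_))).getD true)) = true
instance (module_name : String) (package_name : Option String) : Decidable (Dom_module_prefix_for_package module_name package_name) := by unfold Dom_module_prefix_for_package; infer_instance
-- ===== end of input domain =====

-- B rewrites A to scan the dotted module string itself for the last token-boundary-aligned
-- occurrence of package_name, instead of splitting both strings into token lists (objective: alternative).

-- ===== PORT A =====
-- the for-loop over idx with early return
def pvAloop (mp pp : List (List Char)) : List Int → Option String
  | [] => none
  | idx :: rest =>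
      if PySem.List.slice mp (some idx) (some (idx + (pp.length : Int))) = pp then
        -- prefix_parts = module_parts[:idx]; return ".".join(prefix_parts) if prefix_parts else None
        (let prefixParts := PySem.List.slice mp none (some idx)
         if prefixParts ≠ [] then some (String.ofList (PySem.Chars.join ['.'] prefixParts)) else none)
      else pvAloop mp pp rest

-- s.split(".") has a nonempty separator, so PySem.Str.split? returns `some`;
-- it is ported as PySem.Chars.splitOn on the code points (exact), keeping the parts as List Char.
def module_prefix_for_package (module_name : String) (package_name : Option String) : Option String :=
  match package_name with
  | none => none
  | some p =>
      if p = "" then none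
      else
        let module_parts := PySem.Chars.splitOn module_name.toList ['.']
        let package_parts := PySem.Chars.splitOn p.toList ['.']
        if module_parts.length < package_parts.length then none
        else pvAloop module_parts package_parts
          (PySem.List.pyRange ((module_parts.length : Int) - (package_parts.length : Int)) (-1) (-1))

-- ===== PORT B =====
-- the for-loop over char index i with early return; conditions exactly as in Source B
def pvBloop (mc pc : List Char) : List Int → Option String
  | [] => none
  | i :: rest =>
      if PySem.Chars.slice mc (some i) (some (i + (pc.length : Int))) = pc
          ∧ (i = 0 ∨ PySem.Chars.pyGet? mc (i - 1) = some '.')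
          ∧ (i + (pc.length : Int) = (mc.length : Int) ∨ PySem.Chars.pyGet? mc (i + (pc.length : Int)) = some '.') then
        if 0 < i then some (String.ofList (PySem.Chars.slice mc none (some (i - 1)))) else none
      else pvBloop mc pc rest

def module_prefix_for_package_alt (module_name : String) (package_name : Option String) : Option String :=
  match package_name with
  | none => none
  | some p =>
      if p = "" then none
      else pvBloop module_name.toList p.toList
        (PySem.List.pyRange ((module_name.toList.length : Int) - (p.toList.length : Int)) (-1) (-1))

-- ===== PRECONDITION & SPEC =====
def Spec_module_prefix_for_package (module_name : String) (package_name : Option String) (out : Option String) : Prop := out = module_prefix_for_package_alt module_name package_name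
instance (module_name : String) (package_name : Option String) (out : Option String) : Decidable (Spec_module_prefix_for_package module_name package_name out) := by unfold Spec_module_prefix_for_package; infer_instance

-- ===== CLAIM (what is proved, stated in full; the proofs are below) =====
def Claim_equal_module_prefix_for_package : Prop := ∀ (module_name : String) (package_name : Option String), Dom_module_prefix_for_package module_name package_name → Spec_module_prefix_for_package module_name package_name (module_prefix_for_package module_name package_name)

-- ===== LEMMAS AND PROOFS =====

-- reference split on '.' (structural); PySem.Chars.splitOn s ['.'] computes this
def msplit : List Char → List (List Char)
  | [] => [[]]
  | c :: r =>
      if c = '.' then [] :: msplit r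
      else
        match msplit r with
        | [] => [[c]]
        | h :: tl => (c :: h) :: tl

-- reference join with '.'
def mjoin : List (List Char) → List Char
  | [] => []
  | [t] => t
  | t :: ts => t ++ '.' :: mjoin ts

-- char position of the start of token idx
def pvPos : List (List Char) → Nat → Nat
  | _, 0 => 0
  | [], _ + 1 => 0
  | t :: ts, idx + 1 => t.length + 1 + pvPos ts idx

-- token-window match (A's view) and boundary-aligned char match (B's view)
def PAm (mp pp : List (List Char)) (idx : Nat) : Prop := (mp.drop idx).take pp.length = pp
def PBm (mc pc : List Char) (i : Nat) : Prop :=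
  pc <+: mc.drop i ∧ (i = 0 ∨ mc[i - 1]? = some '.') ∧
    (i + pc.length = mc.length ∨ mc[i + pc.length]? = some '.')
def PAb (mp pp : List (List Char)) (idx : Nat) : Bool := decide ((mp.drop idx).take pp.length = pp)
def PBb (mc pc : List Char) (i : Nat) : Bool :=
  decide (pc <+: mc.drop i ∧ (i = 0 ∨ mc[i - 1]? = some '.') ∧
    (i + pc.length = mc.length ∨ mc[i + pc.length]? = some '.'))

theorem PAb_iff (mp pp : List (List Char)) (idx : Nat) : PAb mp pp idx = true ↔ PAm mp pp idx := by
  simp [PAb, PAm]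
theorem PBb_iff (mc pc : List Char) (i : Nat) : PBb mc pc i = true ↔ PBm mc pc i := by
  simp [PBb, PBm]

-- descending first-hit search, the common shape of both loops
def descFind (P : Nat → Bool) : Nat → Option Nat
  | 0 => if P 0 then some 0 else none
  | n + 1 => if P (n + 1) then some (n + 1) else descFind P n

theorem msplit_ne_nil (s : List Char) : msplit s ≠ [] := by
  induction s with
  | nil => simp [msplit]
  | cons c r ih =>
    simp only [msplit]
    split
    · simp
    · cases h : msplit r with
      | nil => simp
      | cons a b => simp

theorem msplit_nodot {s : List Char} (h : '.' ∉ s) : msplit s = [s] := by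
  induction s with
  | nil => rfl
  | cons c r ih =>
    simp only [List.mem_cons, not_or] at h
    simp only [msplit, if_neg (fun hc => h.1 (Eq.symm hc)), ih h.2]

theorem msplit_append_dot {t r : List Char} (h : '.' ∉ t) :
    msplit (t ++ '.' :: r) = t :: msplit r := by
  induction t with
  | nil => simp [msplit]
  | cons c u ih =>
    simp only [List.mem_cons, not_or] at h
    rw [List.cons_append]
    simp only [msplit, if_neg (fun hc => h.1 (Eq.symm hc)), ih h.2]

theorem goNil (fuel : Nat) (cur : List Char) (acc : List (List Char)) :
    PySem.Chars.splitOn.go ['.'] (fuel + 1) [] cur acc = (cur.reverse :: acc).reverse := by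
  rw [PySem.Chars.splitOn.go]; omega

theorem goDot (fuel : Nat) (r cur : List Char) (acc : List (List Char)) :
    PySem.Chars.splitOn.go ['.'] (fuel + 1) ('.' :: r) cur acc =
      PySem.Chars.splitOn.go ['.'] fuel r [] (cur.reverse :: acc) := by
  rw [PySem.Chars.splitOn.go]; simp [List.isPrefixOf]

theorem goCons (fuel : Nat) (c : Char) (r cur : List Char) (acc : List (List Char)) (h : c ≠ '.') :
    PySem.Chars.splitOn.go ['.'] (fuel + 1) (c :: r) cur acc =
      PySem.Chars.splitOn.go ['.'] fuel r (c :: cur) acc := by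
  rw [PySem.Chars.splitOn.go]; simp [List.isPrefixOf]
  exact fun hc => absurd (Eq.symm hc) h

theorem go_eq (fuel : Nat) : ∀ (l cur : List Char) (acc : List (List Char)), l.length ≤ fuel →
    PySem.Chars.splitOn.go ['.'] fuel l cur acc =
      acc.reverse ++ (cur.reverse ++ (msplit l).headI) :: (msplit l).tail := by
  induction fuel with
  | zero =>
    intro l cur acc hl
    have : l = [] := by cases l <;> simp_all
    subst this
    rw [PySem.Chars.splitOn.go]
    simp [msplit]
  | succ fuel ih =>
    intro l cur acc hl
    cases l with
    | nil => rw [goNil]; simp [msplit]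
    | cons c r =>
      by_cases hc : c = '.'
      · subst hc
        rw [goDot, ih r [] _ (by simpa using Nat.le_of_succ_le_succ hl)]
        cases hmr : msplit r with
        | nil => exact absurd hmr (msplit_ne_nil r)
        | cons h tl => simp [msplit, hmr]
      · rw [goCons _ _ _ _ _ hc, ih r (c :: cur) acc (by simpa using Nat.le_of_succ_le_succ hl)]
        cases hmr : msplit r with
        | nil => exact absurd hmr (msplit_ne_nil r)
        | cons h tl => simp [msplit, hmr, hc]

theorem splitOn_eq_msplit (s : List Char) : PySem.Chars.splitOn s ['.'] = msplit s := by
  show PySem.Chars.splitOn.go ['.'] (s.length + 1) s [] [] = msplit s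
  rw [go_eq _ s [] [] (by omega)]
  cases hms : msplit s with
  | nil => exact absurd hms (msplit_ne_nil s)
  | cons h tl => simp

theorem join_eq_mjoin (l : List (List Char)) : PySem.Chars.join ['.'] l = mjoin l := by
  induction l with
  | nil => rfl
  | cons t ts ih =>
    cases ts with
    | nil => simp [PySem.Chars.join, List.intercalate, List.intersperse, mjoin]
    | cons u us =>
      simp only [PySem.Chars.join] at *
      rw [show List.intercalate ['.'] (t :: u :: us) = t ++ ['.'] ++ List.intercalate ['.'] (u :: us) by
        simp [List.intercalate, List.intersperse], ih]
      simp [mjoin]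

theorem mjoin_cons_cons (a b : List Char) (l : List (List Char)) :
    mjoin (a :: b :: l) = a ++ '.' :: mjoin (b :: l) := rfl

theorem dot_decomp {s : List Char} (h : '.' ∈ s) :
    ∃ t r, s = t ++ '.' :: r ∧ '.' ∉ t := by
  induction s with
  | nil => cases h
  | cons c rest ih =>
    by_cases hc : c = '.'
    · exact ⟨[], rest, by simp [hc], by simp⟩
    · have : '.' ∈ rest := by
        rcases List.mem_cons.1 h with h1 | h1
        · exact absurd h1.symm hc
        · exact h1
      rcases ih this with ⟨t, r, rfl, ht⟩
      refine ⟨c :: t, r, rfl, ?_⟩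
      simp only [List.mem_cons, not_or]
      exact ⟨fun h2 => hc (Eq.symm h2), ht⟩

theorem dot_align {u t x y : List Char} (hu : '.' ∉ u) (ht : '.' ∉ t)
    (h : u ++ '.' :: x = t ++ '.' :: y) : u = t ∧ x = y := by
  induction u generalizing t with
  | nil =>
    cases t with
    | nil => simpa using h
    | cons d t' =>
      simp only [List.nil_append, List.cons_append, List.cons.injEq] at h
      exact absurd (h.1.symm ▸ List.mem_cons_self) ht
  | cons c u' ih =>
    cases t with
    | nil =>
      simp only [List.cons_append, List.nil_append, List.cons.injEq] at h
      exact absurd (h.1 ▸ List.mem_cons_self) hu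
    | cons d t' =>
      simp only [List.cons_append, List.cons.injEq] at h
      have := ih (fun hm => hu (List.mem_cons_of_mem _ hm)) (fun hm => ht (List.mem_cons_of_mem _ hm)) h.2
      exact ⟨by rw [h.1, this.1], this.2⟩

theorem pref_iff_aux : ∀ (n : Nat) (pc mc : List Char), pc.length ≤ n →
    ((pc <+: mc ∧ (pc.length = mc.length ∨ mc[pc.length]? = some '.')) ↔
      (msplit mc).take (msplit pc).length = msplit pc) := by
  intro n
  induction n with
  | zero =>
    intro pc mc hl
    have hpc0 : pc = [] := by cases pc <;> simp_all
    subst hpc0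
    simp only [List.nil_prefix, true_and, List.length_nil]
    rw [show msplit [] = [[]] from rfl]
    simp only [List.length_cons, List.length_nil]
    by_cases hmc : '.' ∈ mc
    · rcases dot_decomp hmc with ⟨t, r, rfl, ht⟩
      rw [msplit_append_dot ht]
      simp only [List.take_succ_cons, List.take_zero, List.cons.injEq, and_true]
      constructor
      · rintro (h | h)
        · simp at h
        · rcases t with _ | ⟨c, t'⟩
          · rfl
          · exfalso
            simp only [List.cons_append, List.getElem?_cons_zero, Option.some.injEq] at h
            exact ht (h ▸ List.mem_cons_self)
      · rintro rfl
        exact Or.inr rfl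
    · rw [msplit_nodot hmc]
      simp only [List.take_succ_cons, List.take_zero, List.cons.injEq, and_true]
      constructor
      · rintro (h | h)
        · cases mc
          · rfl
          · simp at h
        · exact absurd (List.mem_of_getElem? h) hmc
      · rintro rfl
        exact Or.inl rfl
  | succ n ih =>
    intro pc mc hl
    by_cases hpc : '.' ∈ pc
    · rcases dot_decomp hpc with ⟨u, q, rfl, hu⟩
      rw [msplit_append_dot hu]
      by_cases hmc : '.' ∈ mc
      · rcases dot_decomp hmc with ⟨t, r, rfl, ht⟩
        rw [msplit_append_dot ht]
        have hq : q.length ≤ n := by simp at hl; omega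
        constructor
        · rintro ⟨⟨s, hs⟩, hend⟩
          rw [List.append_assoc, List.cons_append] at hs
          rcases dot_align hu ht hs with ⟨rfl, hqs⟩
          have hqr : q <+: r := ⟨s, hqs⟩
          have hend' : q.length = r.length ∨ r[q.length]? = some '.' := by
            rcases hend with h | h
            · left; simp at h; omega
            · right
              rw [show (u ++ '.' :: q).length = u.length + (q.length + 1) by
                simp only [List.length_append, List.length_cons]] at h
              rw [List.getElem?_append_right (by omega)] at h
              simpa [Nat.add_sub_cancel_left] using h
          have := (ih q r hq).1 ⟨hqr, hend'⟩
          simp [List.take_succ_cons, this]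
        · intro h
          simp only [List.length_cons, List.take_succ_cons, List.cons.injEq] at h
          rcases h with ⟨rfl, h2⟩
          rcases (ih q r hq).2 h2 with ⟨⟨s, hs⟩, hend⟩
          constructor
          · exact ⟨s, by rw [List.append_assoc, List.cons_append, hs]⟩
          · rcases hend with h | h
            · left; simp; omega
            · right
              rw [show (t ++ '.' :: q).length = t.length + (q.length + 1) by
                simp only [List.length_append, List.length_cons]]
              rw [List.getElem?_append_right (by omega)]
              simpa [Nat.add_sub_cancel_left] using h
      · rw [msplit_nodot hmc]
        constructor
        · rintro ⟨⟨s, hs⟩, _⟩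
          exfalso
          apply hmc
          rw [← hs]
          simp
        · intro h
          exfalso
          have hk : 1 ≤ (msplit q).length := by
            cases hq2 : msplit q
            · exact absurd hq2 (msplit_ne_nil q)
            · simp
          have h1 := congrArg List.length h
          simp only [List.length_take, List.length_cons, List.length_nil] at h1
          omega
    · rw [msplit_nodot hpc]
      by_cases hmc : '.' ∈ mc
      · rcases dot_decomp hmc with ⟨t, r, rfl, ht⟩
        rw [msplit_append_dot ht]
        simp only [List.length_cons, List.length_nil, List.take_succ_cons, List.take_zero,
          List.cons.injEq, and_true]
        constructor
        · rintro ⟨⟨s, hs⟩, hend⟩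
          rcases hend with h | h
          · exfalso
            have : s = [] := by
              have := congrArg List.length hs
              simp at this h
              cases s
              · rfl
              · simp at this; omega
            subst this
            simp at hs
            subst hs
            exact hpc hmc
          · rw [← hs, List.getElem?_append_right (le_refl _)] at h
            simp only [Nat.sub_self] at h
            rcases s with _ | ⟨c, s'⟩
            · simp at h
            · simp only [List.getElem?_cons_zero, Option.some.injEq] at h
              subst h
              have hs2 : pc ++ '.' :: s' = t ++ '.' :: r := hs
              exact (dot_align hpc ht hs2).1.symm
        · rintro rfl
          refine ⟨⟨'.' :: r, rfl⟩, Or.inr ?_⟩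
          rw [List.getElem?_append_right (le_refl _)]
          simp
      · rw [msplit_nodot hmc]
        simp only [List.length_cons, List.length_nil, List.take_succ_cons, List.take_zero,
          List.cons.injEq, and_true]
        constructor
        · rintro ⟨hpre, hend⟩
          rcases hend with h | h
          · exact (List.IsPrefix.eq_of_length hpre h).symm
          · exfalso
            exact hmc (List.mem_of_getElem? h)
        · rintro rfl
          exact ⟨List.prefix_refl _, Or.inl rfl⟩

theorem pref_iff (pc mc : List Char) :
    (pc <+: mc ∧ (pc.length = mc.length ∨ mc[pc.length]? = some '.')) ↔
      (msplit mc).take (msplit pc).length = msplit pc :=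
  pref_iff_aux pc.length pc mc le_rfl

theorem descFind_eq_none_iff (P : Nat → Bool) (n : Nat) :
    descFind P n = none ↔ ∀ i ≤ n, ¬P i := by
  induction n with
  | zero =>
    simp only [descFind]
    constructor
    · intro h; split at h
      · exact absurd h (by simp)
      · intro i hi; interval_cases i; assumption
    · intro h; rw [if_neg (h 0 le_rfl)]
  | succ n ih =>
    simp only [descFind]
    constructor
    · intro h; split at h
      · exact absurd h (by simp)
      · intro i hi
        rcases Nat.lt_or_ge i (n+1) with h2 | h2
        · exact (ih.1 h) i (by omega)
        · have : i = n + 1 := by omega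
          subst this; assumption
    · intro h
      rw [if_neg (h (n+1) le_rfl)]
      exact ih.2 (fun i hi => h i (by omega))

theorem descFind_eq_some_iff (P : Nat → Bool) (n i : Nat) :
    descFind P n = some i ↔ i ≤ n ∧ P i ∧ ∀ j, i < j → j ≤ n → ¬P j := by
  induction n with
  | zero =>
    simp only [descFind]
    constructor
    · intro h; split at h
      · cases h; exact ⟨le_rfl, by assumption, fun j h1 h2 => by omega⟩
      · cases h
    · rintro ⟨h1, h2, _⟩
      have : i = 0 := by omega
      subst this; rw [if_pos h2]
  | succ n ih =>
    simp only [descFind]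
    constructor
    · intro h; split at h
      · cases h
        exact ⟨le_rfl, by assumption, fun j h1 h2 => by omega⟩
      · rcases ih.1 h with ⟨h1, h2, h3⟩
        refine ⟨by omega, h2, fun j hj1 hj2 => ?_⟩
        rcases Nat.lt_or_ge j (n+1) with h4 | h4
        · exact h3 j hj1 (by omega)
        · have : j = n + 1 := by omega
          subst this; assumption
    · rintro ⟨h1, h2, h3⟩
      by_cases hp : P (n+1)
      · rcases Nat.lt_or_ge i (n+1) with h4 | h4
        · exact absurd hp (h3 (n+1) (by omega) le_rfl)
        · have : i = n + 1 := by omega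
          subst this; rw [if_pos hp]
      · have hin : i ≤ n := by
          rcases Nat.lt_or_ge i (n+1) with h4 | h4
          · omega
          · have : i = n + 1 := by omega
            subst this; exact absurd h2 hp
        rw [if_neg hp]
        exact ih.2 ⟨hin, h2, fun j hj1 hj2 => h3 j hj1 (by omega)⟩

theorem pvPos_mono (mp : List (List Char)) {a b : Nat} (h : a ≤ b) : pvPos mp a ≤ pvPos mp b := by
  induction mp generalizing a b with
  | nil => cases a <;> cases b <;> simp [pvPos]
  | cons t ts ih =>
    cases a with
    | zero => cases b with
      | zero => exact le_rfl
      | succ b => simp [pvPos]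
    | succ a => cases b with
      | zero => omega
      | succ b =>
        simp only [pvPos]
        have := ih (a := a) (b := b) (by omega)
        omega

theorem pvPos_eq_zero_iff (t : List Char) (ts : List (List Char)) (idx : Nat) :
    pvPos (t :: ts) idx = 0 ↔ idx = 0 := by
  cases idx <;> simp [pvPos]

theorem pvPos_pos {ts : List (List Char)} {m : Nat} (hts : ts ≠ []) (hm : 1 ≤ m) :
    1 ≤ pvPos ts m := by
  cases ts with
  | nil => exact absurd rfl hts
  | cons h tl =>
    cases m with
    | zero => omega
    | succ m' => simp only [pvPos]; omega

theorem bij_nodot (pc mc : List Char) (i : Nat) (hmc : '.' ∉ mc) :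
    PBm mc pc i ↔ ∃ idx, PAm (msplit mc) (msplit pc) idx ∧ i = pvPos (msplit mc) idx := by
  rw [msplit_nodot hmc]
  constructor
  · rintro ⟨h1, h2, h3⟩
    rcases Nat.eq_zero_or_pos i with rfl | hi
    · refine ⟨0, ?_, rfl⟩
      unfold PAm
      simp only [List.drop_zero]
      have := (pref_iff pc mc).1 ⟨by simpa using h1, by simpa using h3⟩
      rwa [msplit_nodot hmc] at this
    · exfalso
      rcases h2 with h2 | h2
      · omega
      · exact hmc (List.mem_of_getElem? h2)
  · rintro ⟨idx, hA, rfl⟩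
    cases idx with
    | zero =>
      have : (msplit mc).take (msplit pc).length = msplit pc := by
        rw [msplit_nodot hmc]
        simpa [PAm] using hA
      rcases (pref_iff pc mc).2 this with ⟨hp, he⟩
      exact ⟨by simpa using hp, Or.inl rfl, by simpa [pvPos] using he⟩
    | succ m =>
      exfalso
      unfold PAm at hA
      simp only [List.drop_succ_cons, List.drop_nil, List.take_nil] at hA
      exact msplit_ne_nil pc hA.symm

theorem bij_aux : ∀ (n : Nat) (pc mc : List Char) (i : Nat), mc.length ≤ n →
    (PBm mc pc i ↔ ∃ idx, PAm (msplit mc) (msplit pc) idx ∧ i = pvPos (msplit mc) idx) := by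
  intro n
  induction n with
  | zero =>
    intro pc mc i hl
    have : mc = [] := by cases mc <;> simp_all
    subst this
    exact bij_nodot pc [] i (by simp)
  | succ n ih =>
    intro pc mc i hl
    by_cases hmc : '.' ∈ mc
    · rcases dot_decomp hmc with ⟨t, r, rfl, ht⟩
      have hr : r.length ≤ n := by
        simp only [List.length_append, List.length_cons] at hl; omega
      rw [msplit_append_dot ht]
      by_cases hi0 : i = 0
      · subst hi0
        constructor
        · rintro ⟨h1, _, h3⟩
          refine ⟨0, ?_, rfl⟩
          unfold PAm
          simp only [List.drop_zero]
          have := (pref_iff pc (t ++ '.' :: r)).1 ⟨by simpa using h1, by simpa using h3⟩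
          rwa [msplit_append_dot ht] at this
        · rintro ⟨idx, hA, hpos⟩
          have hidx : idx = 0 := (pvPos_eq_zero_iff t (msplit r) idx).1 hpos.symm
          subst hidx
          have : (msplit (t ++ '.' :: r)).take (msplit pc).length = msplit pc := by
            rw [msplit_append_dot ht]
            simpa [PAm] using hA
          rcases (pref_iff pc (t ++ '.' :: r)).2 this with ⟨hp, he⟩
          exact ⟨by simpa using hp, Or.inl rfl, by simpa using he⟩
      · by_cases hit : i ≤ t.length
        · constructor
          · rintro ⟨_, h2, _⟩
            exfalso
            rcases h2 with h2 | h2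
            · exact hi0 h2
            · rw [List.getElem?_append_left (by omega)] at h2
              exact ht (List.mem_of_getElem? h2)
          · rintro ⟨idx, hA, hpos⟩
            exfalso
            cases idx with
            | zero => exact hi0 hpos
            | succ m =>
              simp only [pvPos] at hpos
              omega
        · obtain ⟨j, rfl⟩ : ∃ j, i = t.length + 1 + j := ⟨i - (t.length + 1), by omega⟩
          have hdrop : (t ++ '.' :: r).drop (t.length + 1 + j) = r.drop j := by
            rw [show t.length + 1 + j = t.length + (1 + j) by omega,
              List.drop_length_add_append]
            rw [Nat.add_comm, List.drop_succ_cons]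
          have key : PBm (t ++ '.' :: r) pc (t.length + 1 + j) ↔ PBm r pc j := by
            unfold PBm
            rw [hdrop, show t.length + 1 + j - 1 = t.length + j by omega]
            constructor
            · rintro ⟨h1, h2, h3⟩
              refine ⟨h1, ?_, ?_⟩
              · rcases h2 with h2 | h2
                · omega
                · cases j with
                  | zero => exact Or.inl rfl
                  | succ j' =>
                    right
                    rw [List.getElem?_append_right (by omega),
                      show t.length + (j' + 1) - t.length = j' + 1 by omega] at h2
                    simpa using h2
              · rcases h3 with h3 | h3
                · left
                  simp only [List.length_append, List.length_cons] at h3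
                  omega
                · right
                  rw [List.getElem?_append_right (by omega),
                    show t.length + 1 + j + pc.length - t.length = (j + pc.length) + 1 by omega] at h3
                  simpa using h3
            · rintro ⟨h1, h2, h3⟩
              refine ⟨h1, ?_, ?_⟩
              · right
                cases j with
                | zero =>
                  rw [show t.length + 0 = t.length by omega,
                    List.getElem?_append_right (le_refl _)]
                  simp
                | succ j' =>
                  rcases h2 with h2 | h2
                  · omega
                  · rw [List.getElem?_append_right (by omega),
                      show t.length + (j' + 1) - t.length = j' + 1 by omega]
                    simpa using h2
              · rcases h3 with h3 | h3
                · left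
                  simp only [List.length_append, List.length_cons]
                  omega
                · right
                  rw [List.getElem?_append_right (by omega),
                    show t.length + 1 + j + pc.length - t.length = (j + pc.length) + 1 by omega]
                  simpa using h3
          rw [key, ih pc r j hr]
          constructor
          · rintro ⟨idx, hA, rfl⟩
            refine ⟨idx + 1, ?_, ?_⟩
            · unfold PAm at hA ⊢
              simpa using hA
            · simp [pvPos]
          · rintro ⟨idx, hA, hpos⟩
            cases idx with
            | zero => simp [pvPos] at hpos
            | succ m =>
              refine ⟨m, ?_, ?_⟩
              · unfold PAm at hA ⊢
                simpa using hA
              · simp only [pvPos] at hpos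
                omega
    · exact bij_nodot pc mc i hmc

theorem bij (pc mc : List Char) (i : Nat) :
    PBm mc pc i ↔ ∃ idx, PAm (msplit mc) (msplit pc) idx ∧ i = pvPos (msplit mc) idx :=
  bij_aux mc.length pc mc i le_rfl

theorem take_pos_aux : ∀ (n : Nat) (mc : List Char) (idx : Nat), mc.length ≤ n → 1 ≤ idx →
    idx ≤ (msplit mc).length →
    mc.take (pvPos (msplit mc) idx - 1) = mjoin ((msplit mc).take idx) := by
  intro n
  induction n with
  | zero =>
    intro mc idx hl h1 h2
    have : mc = [] := by cases mc <;> simp_all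
    subst this
    rw [show msplit [] = [[]] from rfl] at h2 ⊢
    simp only [List.length_cons, List.length_nil] at h2
    have : idx = 1 := by omega
    subst this
    simp [pvPos, mjoin]
  | succ n ih =>
    intro mc idx hl h1 h2
    by_cases hmc : '.' ∈ mc
    · rcases dot_decomp hmc with ⟨t, r, rfl, ht⟩
      have hr : r.length ≤ n := by
        simp only [List.length_append, List.length_cons] at hl; omega
      rw [msplit_append_dot ht] at h2 ⊢
      cases idx with
      | zero => omega
      | succ m =>
        cases m with
        | zero =>
          simp only [pvPos, List.take_succ_cons, List.take_zero]
          rw [show t.length + 1 + 0 - 1 = t.length by omega]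
          rw [List.take_left' rfl]
          rfl
        | succ m' =>
          have hms : msplit r ≠ [] := msplit_ne_nil r
          have hp1 : 1 ≤ pvPos (msplit r) (m' + 1) := pvPos_pos hms (by omega)
          simp only [pvPos, List.take_succ_cons]
          rw [show t.length + 1 + pvPos (msplit r) (m' + 1) - 1
              = t.length + (1 + (pvPos (msplit r) (m' + 1) - 1)) by omega]
          rw [List.take_length_add_append]
          have hIH := ih r (m' + 1) hr (by omega) (by
            simp only [List.length_cons] at h2; omega)
          rw [show (1 : Nat) + (pvPos (msplit r) (m' + 1) - 1)
              = (pvPos (msplit r) (m' + 1) - 1) + 1 by omega]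
          rw [List.take_succ_cons, hIH]
          cases hms2 : msplit r with
          | nil => exact absurd hms2 hms
          | cons u us => rw [List.take_succ_cons, mjoin_cons_cons, ← List.take_succ_cons]
    · rw [msplit_nodot hmc] at h2 ⊢
      simp only [List.length_cons, List.length_nil] at h2
      have : idx = 1 := by omega
      subst this
      simp only [pvPos, List.take_succ_cons, List.take_zero]
      rw [show mc.length + 1 + 0 - 1 = mc.length by omega, List.take_length]
      rfl

theorem take_pos_eq_mjoin_take (mc : List Char) (idx : Nat) (h1 : 1 ≤ idx)
    (h2 : idx ≤ (msplit mc).length) :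
    mc.take (pvPos (msplit mc) idx - 1) = mjoin ((msplit mc).take idx) :=
  take_pos_aux mc.length mc idx le_rfl h1 h2

theorem PAm_le {mp pp : List (List Char)} {idx : Nat} (hpp : pp ≠ []) (h : PAm mp pp idx) :
    idx + pp.length ≤ mp.length := by
  unfold PAm at h
  have := congrArg List.length h
  simp only [List.length_take, List.length_drop] at this
  have hpplen : 1 ≤ pp.length := by cases pp <;> simp_all
  omega

theorem PBm_le {mc pc : List Char} {i : Nat} (hpc : pc ≠ []) (h : PBm mc pc i) :
    i + pc.length ≤ mc.length := by
  obtain ⟨⟨s, hs⟩, -, -⟩ := h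
  have := congrArg List.length hs
  simp only [List.length_append, List.length_drop] at this
  have : pc.length + s.length = mc.length - i := this
  have hpclen : 1 ≤ pc.length := by cases pc <;> simp_all
  omega

theorem acond_iff (mp pp : List (List Char)) (n : Nat) :
    PySem.List.slice mp (some (n : Int)) (some ((n : Int) + (pp.length : Int))) = pp ↔ PAm mp pp n := by
  rw [PySem.List.slice_natCast_add]
  rfl

theorem aloop_body (mp pp : List (List Char)) (n : Nat) (rest : List Int) :
    pvAloop mp pp ((n : Int) :: rest) =
      if PAb mp pp n then
        (if mp.take n = [] then none
         else some (String.ofList (PySem.Chars.join ['.'] (mp.take n))))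
      else pvAloop mp pp rest := by
  rw [pvAloop]
  by_cases h : PAm mp pp n
  · rw [if_pos ((acond_iff mp pp n).2 h), if_pos ((PAb_iff mp pp n).2 h)]
    simp only [PySem.List.slice_to_natCast]
    by_cases h2 : mp.take n = []
    · simp [h2]
    · simp [h2]
  · rw [if_neg (fun hc => h ((acond_iff mp pp n).1 hc)),
      if_neg (fun hc => h ((PAb_iff mp pp n).1 hc))]

theorem aloop_eq (mp pp : List (List Char)) (n : Nat) :
    pvAloop mp pp (PySem.List.pyRange (n : Int) (-1) (-1)) =
      (descFind (PAb mp pp) n).bind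
        (fun idx => if mp.take idx = [] then none
          else some (String.ofList (PySem.Chars.join ['.'] (mp.take idx)))) := by
  induction n with
  | zero =>
    rw [PySem.List.pyRange_neg_one_cons (by omega), PySem.List.pyRange_neg_one_eq_nil (by omega)]
    rw [aloop_body mp pp 0]
    by_cases h : PAb mp pp 0 <;> simp [descFind, h, pvAloop]
  | succ n ih =>
    rw [PySem.List.pyRange_neg_one_cons (by omega)]
    rw [show ((n+1 : Nat) : Int) - 1 = (n : Int) by omega]
    rw [aloop_body mp pp (n+1), ih]
    by_cases h : PAb mp pp (n+1) <;> simp [descFind, h]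

theorem bcond_iff (mc pc : List Char) (n : Nat) :
    (PySem.Chars.slice mc (some (n : Int)) (some ((n : Int) + (pc.length : Int))) = pc
      ∧ ((n : Int) = 0 ∨ PySem.Chars.pyGet? mc ((n : Int) - 1) = some '.')
      ∧ ((n : Int) + (pc.length : Int) = (mc.length : Int) ∨
          PySem.Chars.pyGet? mc ((n : Int) + (pc.length : Int)) = some '.')) ↔ PBm mc pc n := by
  unfold PBm
  constructor
  · rintro ⟨h1, h2, h3⟩
    refine ⟨?_, ?_, ?_⟩
    · rw [PySem.Chars.slice_eq_listSlice, PySem.List.slice_natCast_add] at h1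
      exact h1 ▸ List.take_prefix _ _
    · rcases h2 with h2 | h2
      · exact Or.inl (by exact_mod_cast h2)
      · rcases Nat.eq_zero_or_pos n with h0 | h0
        · exact Or.inl h0
        · refine Or.inr ?_
          rw [PySem.Chars.pyGet?_eq_listPyGet?, show (n : Int) - 1 = ((n - 1 : Nat) : Int) by omega,
            PySem.List.pyGet?_natCast] at h2
          exact h2
    · rcases h3 with h3 | h3
      · exact Or.inl (by exact_mod_cast h3)
      · refine Or.inr ?_
        rw [PySem.Chars.pyGet?_eq_listPyGet?, show (n : Int) + (pc.length : Int) = ((n + pc.length : Nat) : Int) by omega,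
          PySem.List.pyGet?_natCast] at h3
        exact h3
  · rintro ⟨h1, h2, h3⟩
    refine ⟨?_, ?_, ?_⟩
    · rw [PySem.Chars.slice_eq_listSlice, PySem.List.slice_natCast_add]
      rw [List.prefix_iff_eq_take] at h1
      exact h1.symm
    · rcases h2 with h2 | h2
      · exact Or.inl (by exact_mod_cast h2)
      · rcases Nat.eq_zero_or_pos n with h0 | h0
        · exact Or.inl (by exact_mod_cast h0)
        · refine Or.inr ?_
          rw [PySem.Chars.pyGet?_eq_listPyGet?, show (n : Int) - 1 = ((n - 1 : Nat) : Int) by omega,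
            PySem.List.pyGet?_natCast]
          exact h2
    · rcases h3 with h3 | h3
      · exact Or.inl (by exact_mod_cast h3)
      · refine Or.inr ?_
        rw [PySem.Chars.pyGet?_eq_listPyGet?, show (n : Int) + (pc.length : Int) = ((n + pc.length : Nat) : Int) by omega,
          PySem.List.pyGet?_natCast]
        exact h3

theorem bloop_body (mc pc : List Char) (n : Nat) (rest : List Int) :
    pvBloop mc pc ((n : Int) :: rest) =
      if PBb mc pc n then
        (if n = 0 then none else some (String.ofList (mc.take (n - 1))))
      else pvBloop mc pc rest := by
  rw [pvBloop]
  by_cases h : PBm mc pc n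
  · rw [if_pos ((bcond_iff mc pc n).2 h), if_pos ((PBb_iff mc pc n).2 h)]
    rcases Nat.eq_zero_or_pos n with h0 | h0
    · subst h0; simp
    · rw [if_pos (by exact_mod_cast h0), if_neg (by omega)]
      rw [show (n : Int) - 1 = ((n - 1 : Nat) : Int) by omega]
      simp
  · rw [if_neg (fun hc => h ((bcond_iff mc pc n).1 hc)),
      if_neg (fun hc => h ((PBb_iff mc pc n).1 hc))]

theorem bloop_eq (mc pc : List Char) (n : Nat) :
    pvBloop mc pc (PySem.List.pyRange (n : Int) (-1) (-1)) =
      (descFind (PBb mc pc) n).bind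
        (fun i => if i = 0 then none else some (String.ofList (mc.take (i - 1)))) := by
  induction n with
  | zero =>
    rw [PySem.List.pyRange_neg_one_cons (by omega), PySem.List.pyRange_neg_one_eq_nil (by omega)]
    rw [bloop_body mc pc 0]
    by_cases h : PBb mc pc 0 <;> simp [descFind, h, pvBloop]
  | succ n ih =>
    rw [PySem.List.pyRange_neg_one_cons (by omega)]
    rw [show ((n+1 : Nat) : Int) - 1 = (n : Int) by omega]
    rw [bloop_body mc pc (n+1), ih]
    by_cases h : PBb mc pc (n+1) <;> simp [descFind, h]

theorem descFind_transfer (P Q : Nat → Bool) (pos : Nat → Nat) (bN aN : Nat)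
    (hmono : ∀ a b, a ≤ b → pos a ≤ pos b)
    (hQ : ∀ idx, Q idx → idx ≤ aN)
    (hP : ∀ i, P i → i ≤ bN)
    (hiff : ∀ i, P i = true ↔ ∃ idx, Q idx = true ∧ i = pos idx) :
    descFind P bN = (descFind Q aN).map pos := by
  cases hq : descFind Q aN with
  | none =>
    rw [Option.map_none]
    rw [descFind_eq_none_iff] at hq ⊢
    intro i _ hPi
    rcases (hiff i).1 hPi with ⟨idx, hQi, rfl⟩
    exact hq idx (hQ idx hQi) hQi
  | some idx =>
    rw [Option.map_some]
    rw [descFind_eq_some_iff] at hq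
    rcases hq with ⟨hle, hQidx, hmax⟩
    rw [descFind_eq_some_iff]
    have hPpos : P (pos idx) := (hiff (pos idx)).2 ⟨idx, hQidx, rfl⟩
    refine ⟨hP _ hPpos, hPpos, fun j h1 h2 hPj => ?_⟩
    rcases (hiff j).1 hPj with ⟨idx', hQ', rfl⟩
    have hle' : idx' ≤ idx := by
      by_contra hlt
      exact hmax idx' (by omega) (hQ idx' hQ') hQ'
    have := hmono idx' idx hle'
    omega

-- ===== VERDICT (by name: the statement is the Claim_ definition above) =====
theorem module_prefix_for_package_spec : Claim_equal_module_prefix_for_package := by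
  unfold Claim_equal_module_prefix_for_package
  intro m p? _hdom
  unfold Spec_module_prefix_for_package
  cases p? with
  | none => rfl
  | some p =>
    by_cases hp : p = ""
    · simp [module_prefix_for_package, module_prefix_for_package_alt, hp]
    · have hpc : p.toList ≠ [] := by
        intro h
        apply hp
        have := congrArg String.ofList h
        simpa using this
      rw [module_prefix_for_package, module_prefix_for_package_alt]
      simp only [if_neg hp]
      rw [splitOn_eq_msplit, splitOn_eq_msplit]
      set mc := m.toList with hmc
      set pc := p.toList with hpcdef
      set mp := msplit mc with hmp
      set pp := msplit pc with hpp
      have hppne : pp ≠ [] := msplit_ne_nil pc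
      -- facts used on both sides
      have hAnone : mp.length < pp.length → ∀ idx, ¬ PAm mp pp idx := by
        intro hK idx hA
        have := PAm_le hppne hA
        omega
      by_cases hL : mc.length < pc.length
      · -- B's range is empty; A finds nothing
        have hBnil : PySem.List.pyRange ((mc.length : Int) - (pc.length : Int)) (-1) (-1) = [] :=
          PySem.List.pyRange_neg_one_eq_nil (by omega)
        rw [hBnil]
        have hBnone : pvBloop mc pc [] = none := rfl
        rw [hBnone]
        by_cases hK : mp.length < pp.length
        · rw [if_pos hK]
        · rw [if_neg hK]
          rw [show (mp.length : Int) - (pp.length : Int) = ((mp.length - pp.length : Nat) : Int) by omega]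
          rw [aloop_eq]
          have : descFind (PAb mp pp) (mp.length - pp.length) = none := by
            rw [descFind_eq_none_iff]
            intro idx _ hA
            rw [PAb_iff] at hA
            have := (bij pc mc (pvPos mp idx)).2 ⟨idx, hA, rfl⟩
            have := PBm_le hpc this
            omega
          rw [this, Option.bind_none]
      · -- B's range is 0..(L-l)
        rw [show (mc.length : Int) - (pc.length : Int) = ((mc.length - pc.length : Nat) : Int) by omega]
        rw [bloop_eq]
        by_cases hK : mp.length < pp.length
        · rw [if_pos hK]
          have : descFind (PBb mc pc) (mc.length - pc.length) = none := by
            rw [descFind_eq_none_iff]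
            intro i _ hB
            rw [PBb_iff] at hB
            rcases (bij pc mc i).1 hB with ⟨idx, hA, rfl⟩
            exact hAnone hK idx hA
          rw [this, Option.bind_none]
        · rw [if_neg hK]
          rw [show (mp.length : Int) - (pp.length : Int) = ((mp.length - pp.length : Nat) : Int) by omega]
          rw [aloop_eq]
          have htrans := descFind_transfer (PBb mc pc) (PAb mp pp) (pvPos mp)
            (mc.length - pc.length) (mp.length - pp.length)
            (fun a b hab => pvPos_mono mp hab)
            (fun idx hQ => by
              rw [PAb_iff] at hQ
              have := PAm_le hppne hQ
              omega)
            (fun i hPi => by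
              rw [PBb_iff] at hPi
              have := PBm_le hpc hPi
              omega)
            (fun i => by
              rw [PBb_iff]
              rw [bij pc mc i]
              constructor
              · rintro ⟨idx, hA, rfl⟩
                exact ⟨idx, (PAb_iff mp pp idx).2 hA, rfl⟩
              · rintro ⟨idx, hA, rfl⟩
                exact ⟨idx, (PAb_iff mp pp idx).1 hA, rfl⟩)
          rw [htrans]
          cases hd : descFind (PAb mp pp) (mp.length - pp.length) with
          | none => rfl
          | some idx =>
            simp only [Option.map_some, Option.bind_some]
            rcases (descFind_eq_some_iff _ _ _).1 hd with ⟨hidxle, hQidx, -⟩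
            rw [PAb_iff] at hQidx
            cases idx with
            | zero => simp [pvPos]
            | succ idx' =>
              have hmpne : mp ≠ [] := msplit_ne_nil mc
              have hidxlen : idx' + 1 ≤ mp.length := by
                have := PAm_le hppne hQidx
                omega
              have htake : mp.take (idx' + 1) ≠ [] := by
                cases hmp2 : mp with
                | nil => exact absurd hmp2 hmpne
                | cons a b => simp [List.take_succ_cons]
              rw [if_neg htake]
              have hposne : pvPos mp (idx' + 1) ≠ 0 := by
                cases hmp2 : mp with
                | nil => exact absurd hmp2 hmpne
                | cons a b =>
                  rw [hmp2] at *
                  simp [pvPos_eq_zero_iff]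
              rw [if_neg hposne]
              rw [join_eq_mjoin, take_pos_eq_mjoin_take mc (idx' + 1) (by omega) hidxlen]
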